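-- pv_equiv track=rewrite | github.com/ahmadsaeed77/AutoNetIR | app.py | normalize_table_rows
-- ===== SOURCE A (Python) =====
-- def format_key(key):
--     return str(key).replace("_", " ").strip().title()
--
-- def normalize_table_rows(rows, columns, rename):
--     output = []
--     for row in rows or []:
--         normalized = {}
--         for column in columns:
--             label = rename.get(column, format_key(column))
--             normalized[label] = row.get(column, "-")
--         output.append(normalized)
--     return output
-- ===== SOURCE B (Python) =====
-- def format_key(key):
--     return str(key).replace("_", " ").strip().title()
--
-- def normalize_table_rows(rows, columns, rename):
--     # Resolve label collisions once up front: 'order' keeps labels in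
--     # first-occurrence order, 'winner' maps each label to the last column
--     # that produced it (the column whose cell value wins in a dict build).
--     order = []
--     winner = {}
--     for column in columns:
--         label = rename.get(column, format_key(column))
--         if label not in winner:
--             order.append(label)
--         winner[label] = column
--     return [{label: row.get(winner[label], "-") for label in order}
--             for row in (rows or [])]
-- ===== Notes on version B (the rewrite author's own statement) =====
-- stated objective: faster
-- what changed: B precomputes a collision-resolved label table in one pass over columns (labels in first-occurrence order plus, per label, the winning column), so each row's dict is built directly with unique keys by mapping that table, instead of A's per-row insert-with-overwrite dict loop that re-resolves every label for every row.
import Mathlib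
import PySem

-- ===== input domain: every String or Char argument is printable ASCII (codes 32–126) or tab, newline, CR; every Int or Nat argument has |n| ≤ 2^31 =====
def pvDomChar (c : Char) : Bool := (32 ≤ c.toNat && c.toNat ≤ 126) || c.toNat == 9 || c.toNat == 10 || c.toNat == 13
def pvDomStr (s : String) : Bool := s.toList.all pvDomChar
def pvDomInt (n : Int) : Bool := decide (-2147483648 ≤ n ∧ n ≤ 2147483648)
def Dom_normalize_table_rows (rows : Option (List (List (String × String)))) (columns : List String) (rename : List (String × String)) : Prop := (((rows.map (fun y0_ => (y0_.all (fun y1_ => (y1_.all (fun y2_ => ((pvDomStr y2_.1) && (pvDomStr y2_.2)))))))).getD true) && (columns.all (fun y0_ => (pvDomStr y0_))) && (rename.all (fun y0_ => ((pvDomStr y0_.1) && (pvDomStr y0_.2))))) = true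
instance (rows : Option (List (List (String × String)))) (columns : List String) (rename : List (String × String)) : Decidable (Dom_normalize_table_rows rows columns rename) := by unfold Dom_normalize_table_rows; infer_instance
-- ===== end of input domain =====

-- B resolves duplicate-label collisions once over columns (first-occurrence order + winning column per label) and builds each row's dict from that table with unique keys; same return value as A.


-- ===== PORT A =====
-- str.title() ported by hand over List Char: a letter is uppercased after a non-letter,
-- lowercased after a letter (exact for the ASCII domain, where cased = A-Z/a-z).
def pyTitle : List Char → Bool → List Char
  | [], _ => []
  | c :: cs, prevAlpha =>
      (if PySem.Chars.isalpha c then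
        (if prevAlpha then PySem.Chars.lowerChar c else PySem.Chars.upperChar c)
       else c) :: pyTitle cs (PySem.Chars.isalpha c)

-- str(key) on a str is the identity; then replace("_", " ").strip().title()
def format_key (key : String) : String :=
  String.ofList (pyTitle (PySem.Str.strip (PySem.Str.replace key "_" " ")).toList false)

def normalize_table_rows (rows : Option (List (List (String × String)))) (columns : List String) (rename : List (String × String)) : List (List (String × String)) :=
  (rows.getD []).foldl (fun output row =>
    output ++ [(columns.foldl (fun normalized column =>
        normalized.insert (PySem.Dict.getD (PySem.Dict.ofList rename) column (format_key column))
          (PySem.Dict.getD (PySem.Dict.ofList row) column "-"))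
      (PySem.Dict.empty : PySem.Dict String String)).items]) []

-- ===== PORT B =====
-- Python B's 'winner[label]' lookup always hits (label ∈ order ⇒ label ∈ winner);
-- it is ported as getD with an unused "" default.
def normalize_table_rows_alt (rows : Option (List (List (String × String)))) (columns : List String) (rename : List (String × String)) : List (List (String × String)) :=
  let tbl := columns.foldl (fun (p : List String × PySem.Dict String String) column =>
      let label := PySem.Dict.getD (PySem.Dict.ofList rename) column (format_key column)
      ((if p.2.contains label then p.1 else p.1 ++ [label]), p.2.insert label column))
    (([], PySem.Dict.empty) : List String × PySem.Dict String String)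
  (rows.getD []).map (fun row =>
    tbl.1.map (fun label =>
      (label, PySem.Dict.getD (PySem.Dict.ofList row) (PySem.Dict.getD tbl.2 label "") "-")))

-- ===== PRECONDITION & SPEC =====
def Spec_normalize_table_rows (rows : Option (List (List (String × String)))) (columns : List String) (rename : List (String × String)) (out : List (List (String × String))) : Prop := out = normalize_table_rows_alt rows columns rename
instance (rows : Option (List (List (String × String)))) (columns : List String) (rename : List (String × String)) (out : List (List (String × String))) : Decidable (Spec_normalize_table_rows rows columns rename out) := by unfold Spec_normalize_table_rows; infer_instance

-- ===== CLAIM (what is proved, stated in full; the proofs are below) =====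
def Claim_equal_normalize_table_rows : Prop := ∀ (rows : Option (List (List (String × String)))) (columns : List String) (rename : List (String × String)), Dom_normalize_table_rows rows columns rename → Spec_normalize_table_rows rows columns rename (normalize_table_rows rows columns rename)

-- ===== LEMMAS AND PROOFS =====
-- A's append-accumulator loop over rows is the map of the per-row body.
theorem foldl_append_singleton_eq_map {α β : Type} (g : α → β) :
    ∀ (xs : List α) (acc : List β), xs.foldl (fun o r => o ++ [g r]) acc = acc ++ xs.map g := by
  intro xs
  induction xs with
  | nil => simp
  | cons x xs ih => intro acc; simp [List.foldl_cons, ih]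

-- Invariant linking A's per-row insert loop to B's precomputed (order, winner) table:
-- if d's items are exactly the labels of 'order' paired with val of their winning column,
-- folding the remaining columns preserves this for the extended table.
theorem insert_loop_eq_table (lab val : String → String) :
    ∀ (cols : List String) (d : PySem.Dict String String) (order : List String)
      (winner : PySem.Dict String String),
      d.keys = order →
      d.keys.Nodup →
      (∀ l, winner.contains l = d.contains l) →
      d.items = order.map (fun l => (l, val (PySem.Dict.getD winner l ""))) →
      (cols.foldl (fun d c => d.insert (lab c) (val c)) d).items
        = (cols.foldl (fun (p : List String × PySem.Dict String String) c =>
            ((if p.2.contains (lab c) then p.1 else p.1 ++ [lab c]), p.2.insert (lab c) c))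
            (order, winner)).1.map
          (fun l => (l, val (PySem.Dict.getD
            (cols.foldl (fun (p : List String × PySem.Dict String String) c =>
              ((if p.2.contains (lab c) then p.1 else p.1 ++ [lab c]), p.2.insert (lab c) c))
              (order, winner)).2 l ""))) := by
  intro cols
  induction cols with
  | nil => intro d order winner hk _ _ hi; simpa using hi
  | cons c cs ih =>
      intro d order winner hk hnd hc hi
      simp only [List.foldl_cons]
      by_cases hco : d.contains (lab c) = true
      · rw [hc, hco]
        rw [if_pos rfl]
        apply ih
        · rw [PySem.Dict.keys_insert_of_contains _ _ hco]; exact hk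
        · rw [PySem.Dict.keys_insert_of_contains _ _ hco]; exact hnd
        · intro l
          rw [PySem.Dict.contains_insert, PySem.Dict.contains_insert, hc]
        · rw [PySem.Dict.items_insert_of_contains _ _ hco, hi, List.map_map]
          apply List.map_congr_left
          intro l _
          by_cases hl : l = lab c
          · subst hl
            simp
          · simp [hl, PySem.Dict.getD_insert, beq_iff_eq]
      · have hco' : d.contains (lab c) = false := by
          cases h : d.contains (lab c) with
          | true => exact absurd h hco
          | false => rfl
        rw [hc, hco']
        rw [if_neg (by simp)]
        have hnotmem : lab c ∉ order := by
          rw [← hk]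
          intro hmem
          rw [PySem.Dict.contains_iff_mem_keys] at hco
          exact hco hmem
        apply ih
        · rw [PySem.Dict.keys_insert_of_not_contains _ _ hco', hk]
        · rw [PySem.Dict.keys_insert_of_not_contains _ _ hco', hk]
          exact List.Nodup.append (hk ▸ hnd) (List.nodup_singleton _)
            (by simpa using fun h => hnotmem h)
        · intro l
          rw [PySem.Dict.contains_insert, PySem.Dict.contains_insert, hc]
        · rw [PySem.Dict.items_insert_of_not_contains _ _ hco', hi, List.map_append]
          congr 1
          · apply List.map_congr_left
            intro l hl
            have : l ≠ lab c := fun h => hnotmem (h ▸ hl)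
            rw [PySem.Dict.getD_insert_of_ne _ _ _ this]
          · simp [PySem.Dict.getD_insert_self]

-- ===== VERDICT (by name: the statement is the Claim_ definition above) =====
theorem normalize_table_rows_spec : Claim_equal_normalize_table_rows := by
  intro rows columns rename _
  unfold Spec_normalize_table_rows normalize_table_rows normalize_table_rows_alt
  rw [foldl_append_singleton_eq_map]
  simp only [List.nil_append]
  apply List.map_congr_left
  intro row _
  exact insert_loop_eq_table
    (fun c => PySem.Dict.getD (PySem.Dict.ofList rename) c (format_key c))
    (fun c => PySem.Dict.getD (PySem.Dict.ofList row) c "-")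
    columns PySem.Dict.empty [] PySem.Dict.empty rfl (by simp [PySem.Dict.empty])
    (by intro l; rfl) rfl
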